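-- pv_equiv track=rewrite | github.com/Kronos9247/kurven-geogebra | kurven.py | interpolate_tree
-- ===== SOURCE A (Python) =====
-- def isint(name):
--     try:
--         int(name)
--         return True
--     except:
--         return False
--
-- def to_point(name):
--     if isint(name):
--         return "E_{" + str(name) + "}"
--     else:
--         return name
--
-- def interpolate_axis(pointA, pointB, coordinate="x"):
--     return "{0}({2}) * t + {0}({1}) * (1 - t)".format(coordinate, pointA, pointB)
--
-- def interpolate(pointA, pointB, point):
--     pointA = to_point(pointA)
--     pointB = to_point(pointB)
--     point = to_point(point)
--
--     return point + "=(" + interpolate_axis(pointA, pointB) + ", " + interpolate_axis(pointA, pointB, coordinate="y") + ")"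
--
-- def interpolate_tree(points, depth=0):
--     commands = []
--     _points = dict()
--     for i in range(len(points) - 1):
--         point_name = to_point(i + depth)
--         if len(points) == 2:
--             point_name = "E"
--
--         _points[i] = interpolate(points[i], points[i + 1], point_name)
--         commands.append(_points[i])
--
--     if len(points) > 2:
--         new_points = list(_points.keys())
--         new_points = map(lambda point: point + depth, new_points)
--         new_points = list(new_points)
--
--         commands.append(interpolate_tree(new_points, depth=depth + len(new_points)))
--     return "\n".join(commands)
-- ===== SOURCE B (Python) =====
-- def isint(name):
--     try:
--         int(name)
--         return True
--     except:
--         return False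
--
-- def to_point(name):
--     if isint(name):
--         return "E_{" + str(name) + "}"
--     else:
--         return name
--
-- def interpolate_axis(pointA, pointB, coordinate="x"):
--     return "{0}({2}) * t + {0}({1}) * (1 - t)".format(coordinate, pointA, pointB)
--
-- def interpolate(pointA, pointB, point):
--     pointA = to_point(pointA)
--     pointB = to_point(pointB)
--     point = to_point(point)
--     return point + "=(" + interpolate_axis(pointA, pointB) + ", " + interpolate_axis(pointA, pointB, coordinate="y") + ")"
--
-- def interpolate_tree(points, depth=0):
--     # iterative flattening: first level over the given points, then a while
--     # loop over the integer index levels, all into one flat command list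
--     commands = []
--     n = len(points)
--     for i in range(n - 1):
--         name = "E" if n == 2 else to_point(i + depth)
--         commands.append(interpolate(points[i], points[i + 1], name))
--     if n > 2:
--         pts = [k + depth for k in range(n - 1)]
--         depth += n - 1
--         while True:
--             m = len(pts)
--             for i in range(m - 1):
--                 name = "E" if m == 2 else to_point(i + depth)
--                 commands.append(interpolate(pts[i], pts[i + 1], name))
--             if m <= 2:
--                 break
--             pts = [k + depth for k in range(m - 1)]
--             depth += m - 1
--     return "\n".join(commands)
-- ===== Notes on version B (the rewrite author's own statement) =====
-- stated objective: faster
-- what changed: Replaces A's recursion (which joins each deeper level into a string and re-copies it inside every enclosing join) by an explicit while-loop over (points, depth) that appends every level's commands to one flat list and joins once at the end.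
import Mathlib
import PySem

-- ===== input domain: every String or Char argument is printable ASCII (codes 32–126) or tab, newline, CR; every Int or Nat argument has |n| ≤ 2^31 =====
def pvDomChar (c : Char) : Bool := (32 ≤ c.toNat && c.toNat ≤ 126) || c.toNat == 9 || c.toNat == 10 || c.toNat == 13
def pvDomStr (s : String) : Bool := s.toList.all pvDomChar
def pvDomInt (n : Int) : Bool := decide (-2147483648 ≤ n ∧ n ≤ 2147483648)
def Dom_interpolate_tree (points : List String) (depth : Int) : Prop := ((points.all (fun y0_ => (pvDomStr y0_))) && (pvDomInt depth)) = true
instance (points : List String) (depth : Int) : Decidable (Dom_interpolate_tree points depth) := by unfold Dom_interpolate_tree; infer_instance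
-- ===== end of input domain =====

-- B replaces A's recursion by an explicit while-loop that flattens the nested
-- newline-joins into one flat command list, joined once (measured faster at large sizes).


-- ===== PORT A =====
-- shared helpers (the module's own helper functions, used verbatim by A and B)
def pv_isint (name : String) : Bool := (PySem.Int.ofStr? name).isSome

def pv_to_point (name : String) : String :=
  if pv_isint name then "E_{" ++ name ++ "}" else name

-- to_point applied to a Python int (isint is always true there; str(n) = toStr n)
def pv_to_point_int (name : Int) : String := "E_{" ++ PySem.Int.toStr name ++ "}"

def pv_interpolate_axis (pointA pointB coordinate : String) : String :=
  coordinate ++ "(" ++ pointB ++ ") * t + " ++ coordinate ++ "(" ++ pointA ++ ") * (1 - t)"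

-- interpolate(pointA, pointB, point) on string points
def pv_interpolate (pointA pointB point : String) : String :=
  let pointA := pv_to_point pointA
  let pointB := pv_to_point pointB
  let point := pv_to_point point
  point ++ "=(" ++ pv_interpolate_axis pointA pointB "x" ++ ", " ++ pv_interpolate_axis pointA pointB "y" ++ ")"

-- interpolate(pointA, pointB, point) when pointA/pointB are Python ints (recursive levels)
def pv_interpolate_int (pointA pointB : Int) (point : String) : String :=
  let pointA := pv_to_point_int pointA
  let pointB := pv_to_point_int pointB
  let point := pv_to_point point
  point ++ "=(" ++ pv_interpolate_axis pointA pointB "x" ++ ", " ++ pv_interpolate_axis pointA pointB "y" ++ ")"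

-- A's loop body over the dict/commands pair, int-points version (used by the recursion)
def pv_stepA_int (points : List Int) (n : Nat) (depth : Int)
    (st : PySem.Dict Int String × List String) (i : Nat) :
    PySem.Dict Int String × List String :=
  let point_name := pv_to_point_int ((i : Int) + depth)
  let point_name := if n == 2 then "E" else point_name
  let d := st.1.insert (i : Int)
    (pv_interpolate_int (points.getD i 0) (points.getD (i + 1) 0) point_name)
  (d, st.2 ++ [d.getD (i : Int) ""])

-- characterisation of A's fold (dict part and commands part split); also used for termination
theorem pv_foldA_int (points : List Int) (n : Nat) (depth : Int) :
    ∀ (l : List Nat) (d : PySem.Dict Int String) (cmds : List String),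
      l.foldl (pv_stepA_int points n depth) (d, cmds) =
        (l.foldl (fun d i => d.insert (i : Int)
            (pv_interpolate_int (points.getD i 0) (points.getD (i + 1) 0)
              (if n == 2 then "E" else pv_to_point_int ((i : Int) + depth)))) d,
         cmds ++ l.map (fun i =>
            pv_interpolate_int (points.getD i 0) (points.getD (i + 1) 0)
              (if n == 2 then "E" else pv_to_point_int ((i : Int) + depth)))) := by
  intro l
  induction l with
  | nil => intro d cmds; simp
  | cons x xs ih =>
    intro d cmds
    simp only [List.foldl_cons, List.map_cons]
    rw [show pv_stepA_int points n depth (d, cmds) x =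
        (d.insert (x : Int) (pv_interpolate_int (points.getD x 0) (points.getD (x + 1) 0)
            (if n == 2 then "E" else pv_to_point_int ((x : Int) + depth))),
         cmds ++ [pv_interpolate_int (points.getD x 0) (points.getD (x + 1) 0)
            (if n == 2 then "E" else pv_to_point_int ((x : Int) + depth))]) from by
      simp [pv_stepA_int, PySem.Dict.getD_insert_self]]
    rw [ih]
    simp

-- keys of A's dict after the fold over range (n-1) (used for termination and equivalence)
theorem pv_keysA_int (points : List Int) (n : Nat) (depth : Int) (m : Nat) :
    ((List.range m).foldl (fun d i => d.insert (i : Int)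
        (pv_interpolate_int (points.getD i 0) (points.getD (i + 1) 0)
          (if n == 2 then "E" else pv_to_point_int ((i : Int) + depth)))) PySem.Dict.empty).keys
      = (List.range m).map (fun (i : Nat) => (i : Int)) := by
  rw [PySem.Dict.keys_foldl_insert_key (List.range m) (fun (i : Nat) => (i : Int)) _ PySem.Dict.empty]
  have hnd : ((List.range m).map (fun (i : Nat) => (i : Int))).Nodup :=
    (List.nodup_range).map (fun a b h => by exact_mod_cast h)
  rw [show (PySem.Dict.empty : PySem.Dict Int String).keys = ([] : List Int) from rfl]
  exact PySem.Set.update_eq_append_of_disjoint [] _ hnd (by simp)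

-- A's recursion on the integer index lists produced by deeper levels
def interpolate_tree_int (points : List Int) (depth : Int) : String :=
  let n := points.length
  let st := (List.range (n - 1)).foldl (pv_stepA_int points n depth)
    ((PySem.Dict.empty : PySem.Dict Int String), ([] : List String))
  if 2 < n then
    let new_points := st.1.keys.map (fun point => point + depth)
    PySem.Str.join "\n"
      (st.2 ++ [interpolate_tree_int new_points (depth + (new_points.length : Int))])
  else
    PySem.Str.join "\n" st.2
termination_by points.length
decreasing_by
  simp only [pv_foldA_int, pv_keysA_int] at *
  simp_all
  omega

-- A's loop body, string-points version (top level)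
def pv_stepA_str (points : List String) (n : Nat) (depth : Int)
    (st : PySem.Dict Int String × List String) (i : Nat) :
    PySem.Dict Int String × List String :=
  let point_name := pv_to_point_int ((i : Int) + depth)
  let point_name := if n == 2 then "E" else point_name
  let d := st.1.insert (i : Int)
    (pv_interpolate (points.getD i "") (points.getD (i + 1) "") point_name)
  (d, st.2 ++ [d.getD (i : Int) ""])

def interpolate_tree (points : List String) (depth : Int) : String :=
  let n := points.length
  let st := (List.range (n - 1)).foldl (pv_stepA_str points n depth)
    ((PySem.Dict.empty : PySem.Dict Int String), ([] : List String))
  if 2 < n then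
    let new_points := st.1.keys.map (fun point => point + depth)
    PySem.Str.join "\n"
      (st.2 ++ [interpolate_tree_int new_points (depth + (new_points.length : Int))])
  else
    PySem.Str.join "\n" st.2

-- ===== PORT B =====
-- B's while loop: state (pts, depth, commands); one iteration appends the level's
-- commands and replaces pts by the new index list, until at most 2 points remain.
def pv_whileB (pts : List Int) (depth : Int) (commands : List String) : List String :=
  let m := pts.length
  let commands := (List.range (m - 1)).foldl (fun (commands : List String) (i : Nat) =>
      let name := if m == 2 then "E" else pv_to_point_int ((i : Int) + depth)
      commands ++ [pv_interpolate_int (pts.getD i 0) (pts.getD (i + 1) 0) name]) commands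
  if m ≤ 2 then commands
  else pv_whileB ((List.range (m - 1)).map (fun (k : Nat) => (k : Int) + depth))
         (depth + ((m - 1 : Nat) : Int)) commands
termination_by pts.length
decreasing_by simp_all; omega

def interpolate_tree_alt (points : List String) (depth : Int) : String :=
  let n := points.length
  let commands := (List.range (n - 1)).foldl (fun (commands : List String) (i : Nat) =>
      let name := if n == 2 then "E" else pv_to_point_int ((i : Int) + depth)
      commands ++ [pv_interpolate (points.getD i "") (points.getD (i + 1) "") name]) []
  let commands :=
    if 2 < n then
      pv_whileB ((List.range (n - 1)).map (fun (k : Nat) => (k : Int) + depth))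
        (depth + ((n - 1 : Nat) : Int)) commands
    else commands
  PySem.Str.join "\n" commands

-- ===== PRECONDITION & SPEC =====
def Spec_interpolate_tree (points : List String) (depth : Int) (out : String) : Prop := out = interpolate_tree_alt points depth
instance (points : List String) (depth : Int) (out : String) : Decidable (Spec_interpolate_tree points depth out) := by unfold Spec_interpolate_tree; infer_instance

-- ===== CLAIM (what is proved, stated in full; the proofs are below) =====
def Claim_equal_interpolate_tree : Prop := ∀ (points : List String) (depth : Int), Dom_interpolate_tree points depth → Spec_interpolate_tree points depth (interpolate_tree points depth)

-- ===== LEMMAS AND PROOFS =====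

-- join over a nonempty tail
theorem pv_join_cons (sep : List Char) (x : List Char) (l : List (List Char)) (h : l ≠ []) :
    PySem.Chars.join sep (x :: l) = x ++ sep ++ PySem.Chars.join sep l := by
  cases l with
  | nil => exact absurd rfl h
  | cons q rest => exact PySem.Chars.join_cons_cons sep x q rest

-- a joined string as the last element of a join flattens (Chars level)
theorem pv_join_absorb_chars (sep : List Char) :
    ∀ (xs ys : List (List Char)), ys ≠ [] →
      PySem.Chars.join sep (xs ++ [PySem.Chars.join sep ys]) = PySem.Chars.join sep (xs ++ ys) := by
  intro xs
  induction xs with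
  | nil => intro ys _; simp [PySem.Chars.join_singleton]
  | cons x xs ih =>
    intro ys hys
    rw [List.cons_append, pv_join_cons sep x (xs ++ [PySem.Chars.join sep ys]) (by simp),
        List.cons_append, pv_join_cons sep x (xs ++ ys) (by simp_all),
        ih ys hys]

-- the same at the String level
theorem pv_join_absorb (xs ys : List String) (h : ys ≠ []) :
    PySem.Str.join "\n" (xs ++ [PySem.Str.join "\n" ys]) = PySem.Str.join "\n" (xs ++ ys) := by
  simp only [PySem.Str.join, List.map_append, List.map_cons, List.map_nil,
    String.toList_ofList]
  rw [pv_join_absorb_chars _ _ _ (by simpa using h)]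

-- B's while loop equals appending A's recursive result as one joined string
theorem pv_main_int : ∀ (N : Nat) (pts : List Int) (depth : Int) (cmds : List String),
    pts.length = N → 2 ≤ N →
    PySem.Str.join "\n" (pv_whileB pts depth cmds) =
      PySem.Str.join "\n" (cmds ++ [interpolate_tree_int pts depth]) := by
  intro N
  induction N using Nat.strong_induction_on with
  | _ N ih =>
    intro pts depth cmds hlen h2
    rw [pv_whileB, interpolate_tree_int]
    simp only [pv_foldA_int, pv_keysA_int, hlen, PySem.List.foldl_append_singleton_eq_map,
      List.nil_append]
    by_cases hgt : 2 < N
    · have hle : ¬ (N ≤ 2) := by omega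
      rw [if_neg hle, if_pos hgt]
      rw [ih (N - 1) (by omega) _ _ _ (by simp) (by omega)]
      have hmap : ((List.range (N - 1)).map (fun (i : Nat) => (i : Int))).map (fun point => point + depth)
          = (List.range (N - 1)).map (fun (k : Nat) => (k : Int) + depth) := by
        rw [List.map_map]; rfl
      rw [hmap]
      have hlen2 : (((List.range (N - 1)).map (fun (k : Nat) => (k : Int) + depth)).length : Int)
          = ((N - 1 : Nat) : Int) := by simp
      rw [hlen2]
      rw [pv_join_absorb cmds _ (by simp), List.append_assoc]
    · have hN : N = 2 := by omega
      subst hN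
      rw [if_pos (le_refl 2), if_neg hgt]
      rw [pv_join_absorb cmds _ (by simp)]

-- ===== VERDICT (by name: the statement is the Claim_ definition above) =====
theorem interpolate_tree_spec : Claim_equal_interpolate_tree := by
  intro points depth _
  unfold Spec_interpolate_tree interpolate_tree interpolate_tree_alt
  -- split A's top-level fold into dict and command list (string version of pv_foldA_int)
  have hfold : ∀ (l : List Nat) (d : PySem.Dict Int String) (cmds : List String),
      l.foldl (pv_stepA_str points points.length depth) (d, cmds) =
        (l.foldl (fun d i => d.insert (i : Int)
            (pv_interpolate (points.getD i "") (points.getD (i + 1) "")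
              (if points.length == 2 then "E" else pv_to_point_int ((i : Int) + depth)))) d,
         cmds ++ l.map (fun i =>
            pv_interpolate (points.getD i "") (points.getD (i + 1) "")
              (if points.length == 2 then "E" else pv_to_point_int ((i : Int) + depth)))) := by
    intro l
    induction l with
    | nil => intro d cmds; simp
    | cons x xs ihl =>
      intro d cmds
      simp only [List.foldl_cons, List.map_cons]
      rw [show pv_stepA_str points points.length depth (d, cmds) x =
          (d.insert (x : Int) (pv_interpolate (points.getD x "") (points.getD (x + 1) "")
              (if points.length == 2 then "E" else pv_to_point_int ((x : Int) + depth))),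
           cmds ++ [pv_interpolate (points.getD x "") (points.getD (x + 1) "")
              (if points.length == 2 then "E" else pv_to_point_int ((x : Int) + depth))]) from by
        simp [pv_stepA_str, PySem.Dict.getD_insert_self]]
      rw [ihl]
      simp
  have hkeys : ((List.range (points.length - 1)).foldl (fun d i => d.insert (i : Int)
      (pv_interpolate (points.getD i "") (points.getD (i + 1) "")
        (if points.length == 2 then "E" else pv_to_point_int ((i : Int) + depth))))
        PySem.Dict.empty).keys = (List.range (points.length - 1)).map (fun (i : Nat) => (i : Int)) := by
    rw [PySem.Dict.keys_foldl_insert_key]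
    have hnd : ((List.range (points.length - 1)).map (fun (i : Nat) => (i : Int))).Nodup :=
      (List.nodup_range).map (fun a b h => by exact_mod_cast h)
    rw [show (PySem.Dict.empty : PySem.Dict Int String).keys = ([] : List Int) from rfl]
    exact PySem.Set.update_eq_append_of_disjoint [] _ hnd (by simp)
  simp only [hfold, hkeys, PySem.List.foldl_append_singleton_eq_map, List.nil_append]
  by_cases hgt : 2 < points.length
  · simp only [hgt, if_pos]
    have hmap : ((List.range (points.length - 1)).map (fun (i : Nat) => (i : Int))).map
        (fun point => point + depth)
        = (List.range (points.length - 1)).map (fun (k : Nat) => (k : Int) + depth) := by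
      rw [List.map_map]; rfl
    rw [hmap]
    have hlen2 : (((List.range (points.length - 1)).map (fun (k : Nat) => (k : Int) + depth)).length : Int)
        = ((points.length - 1 : Nat) : Int) := by simp
    rw [hlen2]
    rw [pv_main_int (points.length - 1) _ _ _ (by simp) (by omega)]
  · simp [hgt]
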